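-- pv_equiv track=rewrite | github.com/Adam-Guerin/Asmblr | app/mvp/ui_lint.py | _flatten_class_tokens
-- ===== SOURCE A (Python) =====
-- def _flatten_class_tokens(class_strings: list[str]) -> list[str]:
--     tokens: list[str] = []
--     for block in class_strings:
--         for raw in block.split():
--             token = raw.strip()
--             if not token:
--                 continue
--             tokens.append(token)
--     return tokens
-- ===== SOURCE B (Python) =====
-- def _flatten_class_tokens(class_strings: list[str]) -> list[str]:
--     return " ".join(class_strings).split()
-- ===== Notes on version B (the rewrite author's own statement) =====
-- stated objective: simpler
-- what changed: Replaces the nested per-block split/strip/append loops with a single join of all blocks (space-separated) followed by one whitespace split.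
import Mathlib
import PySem

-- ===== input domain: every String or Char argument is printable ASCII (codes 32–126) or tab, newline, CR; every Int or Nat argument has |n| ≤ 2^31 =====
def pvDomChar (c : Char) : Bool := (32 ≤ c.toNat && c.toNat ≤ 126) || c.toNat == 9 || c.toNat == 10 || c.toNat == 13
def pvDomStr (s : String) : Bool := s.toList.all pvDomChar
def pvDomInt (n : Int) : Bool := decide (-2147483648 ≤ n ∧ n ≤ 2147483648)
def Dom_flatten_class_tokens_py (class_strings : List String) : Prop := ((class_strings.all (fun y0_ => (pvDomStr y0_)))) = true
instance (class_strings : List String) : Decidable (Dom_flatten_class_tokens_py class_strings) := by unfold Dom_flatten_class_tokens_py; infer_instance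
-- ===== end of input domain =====

-- B replaces the nested split/strip/append loops with one join and one whitespace split (simpler).
-- ===== PORT A =====
def flatten_class_tokens_py (class_strings : List String) : List String :=
  class_strings.foldl (fun tokens block =>
    (PySem.Str.split₀ block).foldl (fun tokens raw =>
      let token := PySem.Str.strip raw
      if token = "" then tokens
      else tokens ++ [token]) tokens) []

-- ===== PORT B =====
def flatten_class_tokens_py_alt (class_strings : List String) : List String :=
  PySem.Str.split₀ (PySem.Str.join " " class_strings)

-- ===== PRECONDITION & SPEC =====
def Spec_flatten_class_tokens_py (class_strings : List String) (out : List String) : Prop := out = flatten_class_tokens_py_alt class_strings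
instance (class_strings : List String) (out : List String) : Decidable (Spec_flatten_class_tokens_py class_strings out) := by unfold Spec_flatten_class_tokens_py; infer_instance

-- ===== CLAIM (what is proved, stated in full; the proofs are below) =====
def Claim_equal_flatten_class_tokens_py : Prop := ∀ (class_strings : List String), Dom_flatten_class_tokens_py class_strings → Spec_flatten_class_tokens_py class_strings (flatten_class_tokens_py class_strings)

-- ===== LEMMAS AND PROOFS =====

-- go with a non-empty accumulator: the accumulator factors out in front.
theorem go_acc (s : List Char) (cur : List Char) (acc : List (List Char)) :
    PySem.Chars.split₀.go s cur acc = acc.reverse ++ PySem.Chars.split₀.go s cur [] := by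
  induction s generalizing cur acc with
  | nil =>
    simp only [PySem.Chars.split₀.go]
    split <;> simp
  | cons c rest ih =>
    simp only [PySem.Chars.split₀.go]
    split
    · split
      · exact ih _ _
      · rw [ih [] (cur.reverse :: acc), ih [] [cur.reverse]]; simp
    · exact ih _ _

-- split₀ distributes over a single-space separator.
theorem split₀_append_space (s t : List Char) :
    PySem.Chars.split₀ (s ++ ' ' :: t) =
      PySem.Chars.split₀ s ++ PySem.Chars.split₀ t := by
  suffices h : ∀ (s : List Char) (cur : List Char),
      PySem.Chars.split₀.go (s ++ ' ' :: t) cur [] =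
        PySem.Chars.split₀.go s cur [] ++ PySem.Chars.split₀.go t [] [] by
    exact h s []
  intro s
  induction s with
  | nil =>
    intro cur
    simp only [List.nil_append, PySem.Chars.split₀.go]
    rw [if_pos (by decide : PySem.Chars.isspace ' ' = true)]
    by_cases hc : cur.isEmpty
    · simp [hc]
    · rw [if_neg (by simp [hc]), if_neg (by simp [hc]), go_acc t [] [cur.reverse]]
  | cons c rest ih =>
    intro cur
    simp only [List.cons_append, PySem.Chars.split₀.go]
    split
    · split
      · exact ih []
      · rw [go_acc (rest ++ ' ' :: t) [] [cur.reverse], go_acc rest [] [cur.reverse], ih []]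
        simp
    · exact ih _

-- split₀ of a space-joined list is the concatenation of the pieces' split₀s.
theorem split₀_join (parts : List (List Char)) :
    PySem.Chars.split₀ (PySem.Chars.join [' '] parts) =
      parts.flatMap PySem.Chars.split₀ := by
  induction parts with
  | nil => simp [PySem.Chars.join, List.intercalate, PySem.Chars.split₀, PySem.Chars.split₀.go]
  | cons p ps ih =>
    cases ps with
    | nil => simp [PySem.Chars.join, List.intercalate]
    | cons q qs =>
      have : PySem.Chars.join [' '] (p :: q :: qs) = p ++ ' ' :: PySem.Chars.join [' '] (q :: qs) := by
        simp [PySem.Chars.join, List.intercalate]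
      rw [this, split₀_append_space, ih]
      simp

-- every token produced by split₀ is non-empty and free of whitespace characters
theorem split₀_tokens_clean (s : List Char) :
    ∀ tok ∈ PySem.Chars.split₀ s, tok ≠ [] ∧ tok.all (fun c => ¬ PySem.Chars.isspace c) := by
  suffices h : ∀ (s cur : List Char) (acc : List (List Char)),
      cur.all (fun c => ¬ PySem.Chars.isspace c) →
      (∀ tok ∈ acc, tok ≠ [] ∧ tok.all (fun c => ¬ PySem.Chars.isspace c)) →
      ∀ tok ∈ PySem.Chars.split₀.go s cur acc,
        tok ≠ [] ∧ tok.all (fun c => ¬ PySem.Chars.isspace c) by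
    intro tok htok
    exact h s [] [] (by simp) (by simp) tok htok
  intro s
  induction s with
  | nil =>
    intro cur acc hcur hacc tok htok
    simp only [PySem.Chars.split₀.go] at htok
    split at htok
    · exact hacc _ (List.mem_reverse.mp htok)
    · rcases List.mem_cons.mp (List.mem_reverse.mp htok) with h | h
      · rename_i hne
        subst h
        constructor
        · simp only [ne_eq, List.reverse_eq_nil_iff]
          intro hc; exact hne (by simp [hc])
        · simpa using hcur
      · exact hacc _ h
  | cons c rest ih =>
    intro cur acc hcur hacc tok htok
    simp only [PySem.Chars.split₀.go] at htok
    split at htok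
    · split at htok
      · exact ih [] acc (by simp) hacc tok htok
      · rename_i hne
        refine ih [] _ (by simp) ?_ tok htok
        intro t ht
        rcases List.mem_cons.mp ht with h | h
        · subst h
          constructor
          · simp only [ne_eq, List.reverse_eq_nil_iff]
            intro hc; exact hne (by simp [hc])
          · simpa using hcur
        · exact hacc _ h
    · rename_i hns
      refine ih (c :: cur) acc ?_ hacc tok htok
      simp at hcur ⊢
      exact ⟨by simpa using hns, hcur⟩

-- dropWhile is the identity when no element satisfies the predicate
theorem dropWhile_of_none {α : Type} (p : α → Bool) (l : List α)
    (h : ∀ x ∈ l, p x = false) : l.dropWhile p = l := by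
  cases l with
  | nil => rfl
  | cons a l => simp [h a (by simp)]

-- strip is the identity on a whitespace-free list
theorem strip_clean (tok : List Char) (h : tok.all (fun c => ¬ PySem.Chars.isspace c)) :
    PySem.Chars.strip tok = tok := by
  simp only [List.all_eq_true, decide_eq_true_eq] at h
  simp only [PySem.Chars.strip, PySem.Chars.lstrip, PySem.Chars.rstrip]
  have h1 : List.dropWhile PySem.Chars.isspace tok = tok :=
    dropWhile_of_none _ _ (fun x hx => by simpa using h x hx)
  rw [h1, dropWhile_of_none _ _ (fun x hx => by simpa using h x (List.mem_reverse.mp hx)),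
      List.reverse_reverse]

theorem inner_foldl (l : List String) (tokens : List String)
    (h : ∀ raw ∈ l, PySem.Str.strip raw = raw ∧ raw ≠ "") :
    l.foldl (fun tokens raw =>
      let token := PySem.Str.strip raw
      if token = "" then tokens else tokens ++ [token]) tokens = tokens ++ l := by
  induction l generalizing tokens with
  | nil => simp
  | cons r rs ih =>
    obtain ⟨hs, hne⟩ := h r (by simp)
    simp only [List.foldl_cons, hs, if_neg hne]
    rw [ih _ (fun raw hm => h raw (by simp [hm]))]
    simp

theorem str_token_clean (b : String) : ∀ raw ∈ PySem.Str.split₀ b,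
    PySem.Str.strip raw = raw ∧ raw ≠ "" := by
  intro raw hraw
  have hmem : raw.toList ∈ PySem.Chars.split₀ b.toList := by
    rw [← PySem.Str.split₀_map_toList]
    exact List.mem_map_of_mem hraw
  obtain ⟨hne, hclean⟩ := split₀_tokens_clean b.toList raw.toList hmem
  constructor
  · have : (PySem.Str.strip raw).toList = raw.toList := by
      rw [PySem.Str.toList_strip, strip_clean _ hclean]
    exact String.toList_injective this
  · intro h; exact hne (by simp [h])

theorem A_eq_flatMap (cs : List String) (init : List String) :
    cs.foldl (fun tokens block =>
      (PySem.Str.split₀ block).foldl (fun tokens raw =>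
        let token := PySem.Str.strip raw
        if token = "" then tokens else tokens ++ [token]) tokens) init
    = init ++ cs.flatMap PySem.Str.split₀ := by
  induction cs generalizing init with
  | nil => simp
  | cons b bs ih =>
    simp only [List.foldl_cons, List.flatMap_cons]
    rw [inner_foldl _ _ (str_token_clean b), ih]
    simp

-- ===== VERDICT (by name: the statement is the Claim_ definition above) =====
theorem flatten_class_tokens_py_spec : Claim_equal_flatten_class_tokens_py := by
  intro cs _
  unfold Spec_flatten_class_tokens_py flatten_class_tokens_py flatten_class_tokens_py_alt
  rw [A_eq_flatMap cs []]
  have hmap : (PySem.Str.split₀ (PySem.Str.join " " cs)).map String.toList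
      = (cs.flatMap PySem.Str.split₀).map String.toList := by
    rw [PySem.Str.split₀_map_toList, PySem.Str.toList_join]
    have hsep : (" " : String).toList = [' '] := rfl
    rw [hsep, split₀_join]
    simp [List.flatMap_map, List.map_flatMap, PySem.Str.split₀_map_toList]
  simpa using (List.map_injective_iff.mpr (fun _ _ hh => String.toList_injective hh) hmap).symm
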